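-- pv_equiv track=rewrite | github.com/Ugasi/codewars_challenges | Python/is_hollow.py | is_hollow
-- ===== SOURCE A (Python) =====
-- import collections
--
-- def is_hollow(x):
--     first_zero = None
--     last_zero = None
--     counts = collections.Counter(x)
--     if counts.get(0) < 3:
--         return False
--     else:
--         for i, v in enumerate(x):
--             if v == 0:
--                 if first_zero is None:
--                     first_zero = i
--                 if last_zero is None or last_zero < i:
--                     last_zero = i
--         for i in range(first_zero, last_zero):
--             if x[i] != 0:
--                 return False
--         return (first_zero == len(x)-last_zero-1 and first_zero != 0 and last_zero != len(x)) or counts.get(0) == len(x)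
-- ===== SOURCE B (Python) =====
-- import collections
--
-- def is_hollow(x):
--     # Guard as in the spec: fewer than 3 zeros can never be hollow
--     # (and a zero-free list raises TypeError on None < 3, like A).
--     counts = collections.Counter(x)
--     if counts.get(0) < 3:
--         return False
--     # Run-length segmentation: collapse x into runs of (is_zero, length).
--     runs = []
--     for v in x:
--         z = (v == 0)
--         if runs and runs[-1][0] == z:
--             runs[-1] = (z, runs[-1][1] + 1)
--         else:
--             runs.append((z, 1))
--     if len(runs) == 1:
--         return True  # one run with >= 3 zeros: all zeros
--     # hollow iff: non-zero padding, zero middle, equal padding lengths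
--     return len(runs) == 3 and not runs[0][0] and runs[0][1] == runs[2][1]
-- ===== Notes on version B (the rewrite author's own statement) =====
-- stated objective: alternative
-- what changed: Keeps the Counter guard but replaces A's first/last-zero index search, contiguity re-scan and index arithmetic by a single run-length segmentation pass: the list is collapsed into (is_zero, length) runs and hollowness is read off the run pattern (a single all-zero run, or non-zero/zero/non-zero runs with equal padding lengths).
import Mathlib
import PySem

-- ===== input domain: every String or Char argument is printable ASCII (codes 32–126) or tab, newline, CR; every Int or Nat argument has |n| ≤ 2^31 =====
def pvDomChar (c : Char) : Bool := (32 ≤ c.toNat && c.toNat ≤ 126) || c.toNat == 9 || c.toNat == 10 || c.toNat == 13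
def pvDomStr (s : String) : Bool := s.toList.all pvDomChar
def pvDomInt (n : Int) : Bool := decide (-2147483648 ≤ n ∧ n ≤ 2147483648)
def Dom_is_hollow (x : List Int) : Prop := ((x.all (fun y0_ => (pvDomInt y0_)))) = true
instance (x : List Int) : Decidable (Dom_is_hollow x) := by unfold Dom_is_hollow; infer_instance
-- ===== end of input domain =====

-- B replaces A's Counter guard + first/last-zero index arithmetic by one run-length
-- segmentation pass over the list (objective: alternative algorithm, same cost).

-- ===== PORT A =====
-- the body of A's 'for i, v in enumerate(x)' loop
def hollowStepA (st : Option Int × Option Int) (iv : Int × Int) : Option Int × Option Int :=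
  if iv.2 == 0 then
    ((match st.1 with | none => some iv.1 | some j => some j),
     (match st.2 with | none => some iv.1 | some j => if j < iv.1 then some iv.1 else some j))
  else st

def is_hollow (x : List Int) : Bool :=
  let counts := PySem.Dict.counter x
  match counts.get? 0 with
  | none => false   -- here Python raises TypeError (None < 3); these inputs are outside Pre_
  | some c =>
    if c < 3 then false
    else
      let fl := (PySem.List.enumerate x).foldl hollowStepA (none, none)
      match fl with
      | (some f, some l) =>
        if (PySem.List.pyRange f l 1).all (fun i => PySem.List.pyGetD x i 0 == 0) then
          decide ((f = (x.length : Int) - l - 1 ∧ f ≠ 0 ∧ l ≠ (x.length : Int)) ∨ c = (x.length : Int))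
        else false
      | _ => false   -- unreachable: c ≥ 3 guarantees zeros were seen

-- ===== PORT B =====
-- the body of B's loop; 'runs' is kept reversed (head = Python's runs[-1]),
-- so Python's update of the last run is a head update here
def hollowRunStep (runs : List (Bool × Int)) (v : Int) : List (Bool × Int) :=
  let z : Bool := v == 0
  match runs with
  | (z', n) :: t => if z' == z then (z, n + 1) :: t else (z, 1) :: (z', n) :: t
  | [] => [(z, 1)]

def is_hollow_alt (x : List Int) : Bool :=
  let counts := PySem.Dict.counter x
  match counts.get? 0 with
  | none => false   -- here Python B also raises TypeError (None < 3); outside Pre_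
  | some c =>
    if c < 3 then false
    else
      let runs := (x.foldl hollowRunStep []).reverse
      match runs with
      | [_] => true
      | [(z0, a), _, (_, b)] => !z0 && decide (a = b)
      | _ => false

-- ===== PRECONDITION & SPEC =====
-- Pre_ excludes exactly the inputs with no zero: there both Pythons raise TypeError
-- (counts.get(0) is None, compared with 3).
def Pre_is_hollow (x : List Int) : Prop := (0 : Int) ∈ x
instance (x : List Int) : Decidable (Pre_is_hollow x) := by unfold Pre_is_hollow; infer_instance
def pvWitness_is_hollow : List Int := [1, 0, 0, 0, 1]

def Spec_is_hollow (x : List Int) (out : Bool) : Prop := out = is_hollow_alt x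
instance (x : List Int) (out : Bool) : Decidable (Spec_is_hollow x out) := by unfold Spec_is_hollow; infer_instance

-- ===== CLAIM (what is proved, stated in full; the proofs are below) =====
def Claim_equal_is_hollow : Prop := ∀ (x : List Int), Dom_is_hollow x → Pre_is_hollow x → Spec_is_hollow x (is_hollow x)

-- ===== LEMMAS AND PROOFS =====

theorem af_nonzero (q : List Int) (hq : ∀ v ∈ q, v ≠ 0) :
    ∀ (s : Int) (st : Option Int × Option Int),
      List.foldl hollowStepA st (PySem.List.enumerate q s) = st := by
  induction q with
  | nil => intro s st; simp [PySem.List.enumerate_nil]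
  | cons v t ih =>
    intro s st
    rw [PySem.List.enumerate_cons, List.foldl_cons]
    have hv : (v == (0:Int)) = false := by simpa using hq v (by simp)
    rw [show hollowStepA st (s, v) = st by simp [hollowStepA, hv]]
    exact ih (fun w hw => hq w (by simp [hw])) (s+1) st

theorem af_zero (q : List Int) (hq : ∀ v ∈ q, v = 0) (hne : q ≠ []) :
    ∀ (s : Int) (f l : Option Int), (∀ j, l = some j → j < s) →
      List.foldl hollowStepA (f, l) (PySem.List.enumerate q s)
        = (some (f.getD s), some (s + (q.length : Int) - 1)) := by
  induction q with
  | nil => exact absurd rfl hne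
  | cons v t ih =>
    intro s f l hl
    rw [PySem.List.enumerate_cons, List.foldl_cons]
    have hv : v = 0 := hq v (by simp)
    have hstep : hollowStepA (f, l) (s, v) = (some (f.getD s), some s) := by
      cases f <;> cases l with
      | none => simp [hollowStepA, hv]
      | some j => have := hl j rfl; simp [hollowStepA, hv, this]
    rw [hstep]
    rcases t with _ | ⟨w, t'⟩
    · simp [PySem.List.enumerate_nil]
    · have := ih (fun w hw => hq w (by simp [hw])) (by simp) (s+1) (some (f.getD s)) (some s)
        (by intro j hj; cases hj; omega)
      rw [this]
      simp only [Option.getD_some, Prod.mk.injEq, Option.some.injEq, List.length_cons]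
      constructor
      · trivial
      · push_cast; ring

theorem af_grow (q : List Int) :
    ∀ (s j f0 : Int), j < s →
      ∃ m, List.foldl hollowStepA (some f0, some j) (PySem.List.enumerate q s)
             = (some f0, some m) ∧ j ≤ m := by
  induction q with
  | nil => intro s j f0 h; exact ⟨j, by simp [PySem.List.enumerate_nil], le_refl j⟩
  | cons v t ih =>
    intro s j f0 h
    rw [PySem.List.enumerate_cons, List.foldl_cons]
    by_cases hv : v = 0
    · have hstep : hollowStepA (some f0, some j) (s, v) = (some f0, some s) := by
        simp [hollowStepA, hv, h]
      rw [hstep]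
      obtain ⟨m, hm, hle⟩ := ih (s+1) s f0 (by omega)
      exact ⟨m, hm, by omega⟩
    · have hstep : hollowStepA (some f0, some j) (s, v) = (some f0, some j) := by
        simp [hollowStepA, hv]
      rw [hstep]
      obtain ⟨m, hm, hle⟩ := ih (s+1) j f0 (by omega)
      exact ⟨m, hm, hle⟩

theorem bf_nonzero (q : List Int) (hq : ∀ v ∈ q, v ≠ 0) :
    ∀ (n : Int) (t : List (Bool × Int)),
      List.foldl hollowRunStep ((false, n) :: t) q = (false, n + (q.length : Int)) :: t := by
  induction q with
  | nil => intro n t; simp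
  | cons v q' ih =>
    intro n t
    have hv : (v == (0:Int)) = false := by simpa using hq v (by simp)
    rw [List.foldl_cons, show hollowRunStep ((false, n) :: t) v = (false, n+1) :: t by
      simp [hollowRunStep, hv]]
    rw [ih (fun w hw => hq w (by simp [hw])) (n+1) t]
    simp only [List.length_cons]; push_cast; ring_nf

theorem bf_nonzero_nil (q : List Int) (hq : ∀ v ∈ q, v ≠ 0) (hne : q ≠ []) :
    List.foldl hollowRunStep [] q = [(false, (q.length : Int))] := by
  rcases q with _ | ⟨v, q'⟩
  · exact absurd rfl hne
  · have hv : (v == (0:Int)) = false := by simpa using hq v (by simp)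
    rw [List.foldl_cons, show hollowRunStep [] v = [(false, 1)] by simp [hollowRunStep, hv]]
    rw [bf_nonzero q' (fun w hw => hq w (by simp [hw])) 1 []]
    simp only [List.length_cons]; push_cast; ring_nf

theorem bf_nonzero_push (q : List Int) (hq : ∀ v ∈ q, v ≠ 0) (hne : q ≠ []) :
    ∀ (n : Int) (t : List (Bool × Int)),
      List.foldl hollowRunStep ((true, n) :: t) q = (false, (q.length : Int)) :: (true, n) :: t := by
  rcases q with _ | ⟨v, q'⟩
  · exact absurd rfl hne
  · intro n t
    have hv : (v == (0:Int)) = false := by simpa using hq v (by simp)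
    rw [List.foldl_cons, show hollowRunStep ((true, n) :: t) v = (false, 1) :: (true, n) :: t by
      simp [hollowRunStep, hv]]
    rw [bf_nonzero q' (fun w hw => hq w (by simp [hw])) 1 ((true, n) :: t)]
    simp only [List.length_cons]; push_cast; ring_nf

theorem bf_zero (q : List Int) (hq : ∀ v ∈ q, v = 0) :
    ∀ (n : Int) (t : List (Bool × Int)),
      List.foldl hollowRunStep ((true, n) :: t) q = (true, n + (q.length : Int)) :: t := by
  induction q with
  | nil => intro n t; simp
  | cons v q' ih =>
    intro n t
    have hv : v = 0 := hq v (by simp)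
    rw [List.foldl_cons, show hollowRunStep ((true, n) :: t) v = (true, n+1) :: t by
      simp [hollowRunStep, hv]]
    rw [ih (fun w hw => hq w (by simp [hw])) (n+1) t]
    simp only [List.length_cons]; push_cast; ring_nf

theorem bf_zero_nil (q : List Int) (hq : ∀ v ∈ q, v = 0) (hne : q ≠ []) :
    List.foldl hollowRunStep [] q = [(true, (q.length : Int))] := by
  rcases q with _ | ⟨v, q'⟩
  · exact absurd rfl hne
  · have hv : v = 0 := hq v (by simp)
    rw [List.foldl_cons, show hollowRunStep [] v = [(true, 1)] by simp [hollowRunStep, hv]]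
    rw [bf_zero q' (fun w hw => hq w (by simp [hw])) 1 []]
    simp only [List.length_cons]; push_cast; ring_nf

theorem bf_zero_push (q : List Int) (hq : ∀ v ∈ q, v = 0) (hne : q ≠ []) :
    ∀ (n : Int) (t : List (Bool × Int)),
      List.foldl hollowRunStep ((false, n) :: t) q = (true, (q.length : Int)) :: (false, n) :: t := by
  rcases q with _ | ⟨v, q'⟩
  · exact absurd rfl hne
  · intro n t
    have hv : v = 0 := hq v (by simp)
    rw [List.foldl_cons, show hollowRunStep ((false, n) :: t) v = (true, 1) :: (false, n) :: t by
      simp [hollowRunStep, hv]]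
    rw [bf_zero q' (fun w hw => hq w (by simp [hw])) 1 ((false, n) :: t)]
    simp only [List.length_cons]; push_cast; ring_nf

theorem bf_deep (q : List Int) :
    ∀ (b : Bool) (n : Int) (t : List (Bool × Int)),
      ∃ r m, List.foldl hollowRunStep ((b, n) :: t) q = r ++ (b, m) :: t := by
  induction q with
  | nil => intro b n t; exact ⟨[], n, by simp⟩
  | cons v q' ih =>
    intro b n t
    rw [List.foldl_cons]
    by_cases hb : b = (v == (0:Int))
    · rw [show hollowRunStep ((b, n) :: t) v = (b, n+1) :: t by
        simp only [hollowRunStep]; rw [if_pos (by simp [hb]), ← hb]]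
      exact ih b (n+1) t
    · rw [show hollowRunStep ((b, n) :: t) v = ((v == (0:Int)), 1) :: (b, n) :: t by
        simp only [hollowRunStep]; rw [if_neg (by simpa using hb)]]
      obtain ⟨r, m, hr⟩ := ih (v == (0:Int)) 1 ((b, n) :: t)
      exact ⟨r ++ [((v == (0:Int)), m)], n, by rw [hr]; simp⟩

theorem splitNZ (x : List Int) :
    ∃ p rest, x = p ++ rest ∧ (∀ v ∈ p, v ≠ 0) ∧ (rest = [] ∨ ∃ t, rest = (0 : Int) :: t) := by
  induction x with
  | nil => exact ⟨[], [], by simp, by simp, Or.inl rfl⟩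
  | cons v t ih =>
    by_cases hv : v = 0
    · exact ⟨[], v :: t, by simp, by simp, Or.inr ⟨t, by rw [hv]⟩⟩
    · obtain ⟨p, rest, heq, hp, hr⟩ := ih
      exact ⟨v :: p, rest, by simp [heq], by
        intro w hw; rcases List.mem_cons.mp hw with h | h
        · rw [h]; exact hv
        · exact hp w h, hr⟩

theorem splitZ (x : List Int) :
    ∃ z rest, x = z ++ rest ∧ (∀ v ∈ z, v = 0) ∧ (rest = [] ∨ ∃ h t, rest = h :: t ∧ h ≠ (0 : Int)) := by
  induction x with
  | nil => exact ⟨[], [], by simp, by simp, Or.inl rfl⟩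
  | cons v t ih =>
    by_cases hv : v = 0
    · obtain ⟨z, rest, heq, hz, hr⟩ := ih
      exact ⟨v :: z, rest, by simp [heq], by
        intro w hw; rcases List.mem_cons.mp hw with h | h
        · rw [h]; exact hv
        · exact hz w h, hr⟩
    · exact ⟨[], v :: t, by simp, by simp, Or.inr ⟨v, t, rfl, hv⟩⟩

theorem decomp (x : List Int) (hx : (0 : Int) ∈ x) :
    ∃ p z s, x = p ++ z ++ s ∧ (∀ v ∈ p, v ≠ 0) ∧ z ≠ [] ∧ (∀ v ∈ z, v = 0) ∧
      ((∀ v ∈ s, v ≠ 0) ∨ ∃ p2 r, s = p2 ++ (0 : Int) :: r ∧ p2 ≠ [] ∧ ∀ v ∈ p2, v ≠ 0) := by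
  obtain ⟨p, rest, heq, hp, hr⟩ := splitNZ x
  rcases hr with hnil | ⟨t, ht⟩
  · exfalso; rw [heq, hnil] at hx; exact hp 0 (by simpa using hx) rfl
  · subst ht
    obtain ⟨z', s, heq2, hz', hs⟩ := splitZ t
    refine ⟨p, 0 :: z', s, by rw [heq, heq2]; simp, hp, by simp, by
      intro w hw; rcases List.mem_cons.mp hw with h | h
      · exact h
      · exact hz' w h, ?_⟩
    rcases hs with hnil | ⟨h, t', hst, hh⟩
    · exact Or.inl (by rw [hnil]; simp)
    · obtain ⟨p2, rest2, heq3, hp2, hr2⟩ := splitNZ s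
      rcases hr2 with hnil2 | ⟨r, hrr⟩
      · exact Or.inl (by rw [heq3, hnil2]; simpa using hp2)
      · refine Or.inr ⟨p2, r, by rw [heq3, hrr], ?_, hp2⟩
        intro hp2nil
        rw [heq3, hp2nil, hrr] at hst
        simp at hst
        exact hh hst.1.symm

theorem counter_get?_zero (x : List Int) (h : (0 : Int) ∈ x) :
    (PySem.Dict.counter x).get? 0 = some ((x.count 0 : Int)) := by
  cases hg : (PySem.Dict.counter x).get? 0 with
  | none =>
    exfalso
    have := (PySem.Dict.get?_eq_none_iff_not_mem_keys _ _).mp hg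
    rw [PySem.Dict.keys_counter] at this
    exact this (by simpa using (PySem.Set.mem_ofList _ _).mpr h)
  | some c =>
    have h1 : (PySem.Dict.counter x).getD 0 0 = c := PySem.Dict.getD_of_get?_eq_some _ 0 hg
    rw [PySem.Dict.getD_counter] at h1
    rw [← h1]

-- the element at a position inside the middle block
theorem getMid (p z s : List Int) (k : Nat) (h1 : p.length ≤ k) (h2 : k < p.length + z.length) :
    ∃ w ∈ z, (p ++ z ++ s)[k]? = some w := by
  rw [List.append_assoc, List.getElem?_append_right h1,
    List.getElem?_append_left (by omega), List.getElem?_eq_getElem (by omega)]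
  exact ⟨_, List.getElem_mem _, rfl⟩

theorem shapeA_eq (p z s : List Int) (hp : ∀ v ∈ p, v ≠ 0) (hzne : z ≠ []) (hz : ∀ v ∈ z, v = 0)
    (hs : ∀ v ∈ s, v ≠ 0) : is_hollow (p ++ z ++ s) = is_hollow_alt (p ++ z ++ s) := by
  have hx : (0:Int) ∈ p ++ z ++ s := by
    rcases z with _ | ⟨w, z'⟩
    · exact absurd rfl hzne
    · have : w = 0 := hz w (by simp)
      simp [this]
  have hcount : List.count 0 (p ++ z ++ s) = z.length := by
    rw [List.count_append, List.count_append]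
    rw [List.count_eq_zero.mpr (fun h => hp 0 h rfl), List.count_eq_zero.mpr (fun h => hs 0 h rfl),
      List.count_eq_length.mpr (fun b hb => (hz b hb).symm)]
    omega
  have hfold : List.foldl hollowStepA (none, none) (PySem.List.enumerate (p ++ z ++ s))
      = (some (p.length : Int), some ((p.length : Int) + z.length - 1)) := by
    rw [PySem.List.enumerate_append, PySem.List.enumerate_append, List.foldl_append,
      List.foldl_append, af_nonzero p hp, af_zero z hz hzne _ none none (by simp),
      af_nonzero s hs]
    norm_num
  have hall : ∀ i ∈ PySem.List.pyRange (p.length : Int) ((p.length : Int) + z.length - 1) 1,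
      (PySem.List.pyGetD (p ++ z ++ s) i 0 == 0) = true := by
    intro i hi
    rw [PySem.List.mem_pyRange_one] at hi
    have h0 : 0 ≤ i := by omega
    obtain ⟨k, rfl⟩ : ∃ k : Nat, i = (k : Int) := ⟨i.toNat, (Int.toNat_of_nonneg h0).symm⟩
    rw [PySem.List.pyGetD_natCast, List.getD_eq_getElem?_getD]
    obtain ⟨w, hwz, hw⟩ := getMid p z s k (by omega) (by omega)
    rw [hw, hz w hwz]
    simp
  have hA : is_hollow (p ++ z ++ s)
      = (if ((z.length : Int)) < 3 then false else
          decide ((((p.length : Int)) = (((p ++ z ++ s).length : Int)) - ((p.length : Int) + z.length - 1) - 1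
              ∧ ((p.length : Int)) ≠ 0 ∧ ((p.length : Int) + z.length - 1) ≠ (((p ++ z ++ s).length : Int)))
            ∨ ((z.length : Int)) = (((p ++ z ++ s).length : Int)))) := by
    simp only [is_hollow]
    rw [counter_get?_zero _ hx, hcount, hfold]
    by_cases h3 : ((z.length : Int)) < 3
    · simp [h3]
    · simp only [if_neg h3]
      rw [show (PySem.List.pyRange (p.length : Int) ((p.length : Int) + z.length - 1) 1).all
          (fun i => PySem.List.pyGetD (p ++ z ++ s) i 0 == 0) = true from List.all_eq_true.mpr hall]
      simp
  rw [hA]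
  by_cases hp0 : p = [] <;> by_cases hs0 : s = []
  · -- p = [], s = []
    subst hp0; subst hs0
    have hB : is_hollow_alt ([] ++ z ++ []) = (if ((z.length : Int)) < 3 then false else true) := by
      simp only [is_hollow_alt]
      rw [counter_get?_zero _ hx, hcount,
        show List.foldl hollowRunStep ([] : List (Bool × Int)) ([] ++ z ++ [])
          = [(true, (z.length : Int))] by simpa using bf_zero_nil z hz hzne]
      simp
    rw [hB]
    by_cases h3 : ((z.length : Int)) < 3 <;> simp [h3]
  · -- p = [], s ≠ []
    subst hp0
    have hB : is_hollow_alt ([] ++ z ++ s) = false := by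
      simp only [is_hollow_alt]
      rw [counter_get?_zero _ hx, hcount,
        show List.foldl hollowRunStep ([] : List (Bool × Int)) ([] ++ z ++ s)
          = [(false, (s.length : Int)), (true, (z.length : Int))] by
        rw [List.nil_append, List.foldl_append, bf_zero_nil z hz hzne,
          bf_nonzero_push s hs hs0 _ []]]
      simp
    rw [hB]
    have hsl : s.length ≠ 0 := fun h => hs0 (List.length_eq_zero_iff.mp h)
    by_cases h3 : ((z.length : Int)) < 3 <;> simp [h3]; omega
  · -- p ≠ [], s = []
    subst hs0
    have hB : is_hollow_alt (p ++ z ++ []) = false := by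
      simp only [is_hollow_alt]
      rw [counter_get?_zero _ hx, hcount,
        show List.foldl hollowRunStep ([] : List (Bool × Int)) (p ++ z ++ [])
          = [(true, (z.length : Int)), (false, (p.length : Int))] by
        rw [List.append_nil, List.foldl_append, bf_nonzero_nil p hp hp0,
          bf_zero_push z hz hzne _ []]]
      simp
    rw [hB]
    have hpl : p.length ≠ 0 := fun h => hp0 (List.length_eq_zero_iff.mp h)
    by_cases h3 : ((z.length : Int)) < 3 <;> simp [h3]; omega
  · -- p ≠ [], s ≠ []
    have hB : is_hollow_alt (p ++ z ++ s)
        = (if ((z.length : Int)) < 3 then false else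
            (!false && decide ((p.length : Int) = (s.length : Int)))) := by
      simp only [is_hollow_alt]
      rw [counter_get?_zero _ hx, hcount,
        show List.foldl hollowRunStep ([] : List (Bool × Int)) (p ++ z ++ s)
          = [(false, (s.length : Int)), (true, (z.length : Int)), (false, (p.length : Int))] by
        rw [List.foldl_append, List.foldl_append, bf_nonzero_nil p hp hp0,
          bf_zero_push z hz hzne _ [], bf_nonzero_push s hs hs0 _ _]]
      simp
    rw [hB]
    have hpl : p.length ≠ 0 := fun h => hp0 (List.length_eq_zero_iff.mp h)
    have hsl : s.length ≠ 0 := fun h => hs0 (List.length_eq_zero_iff.mp h)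
    by_cases h3 : ((z.length : Int)) < 3 <;> simp [h3]
    rw [Bool.eq_iff_iff]; simp [hp0]; omega

theorem shapeB_eq (p z p2 r : List Int) (hp : ∀ v ∈ p, v ≠ 0) (hzne : z ≠ []) (hz : ∀ v ∈ z, v = 0)
    (hp2ne : p2 ≠ []) (hp2 : ∀ v ∈ p2, v ≠ 0) :
    is_hollow (p ++ z ++ (p2 ++ 0 :: r)) = is_hollow_alt (p ++ z ++ (p2 ++ 0 :: r)) := by
  have hx : (0:Int) ∈ p ++ z ++ (p2 ++ 0 :: r) := by simp
  -- B side is false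
  have hB : is_hollow_alt (p ++ z ++ (p2 ++ 0 :: r)) = false := by
    simp only [is_hollow_alt]
    rw [counter_get?_zero _ hx]
    by_cases hc3 : ((List.count 0 (p ++ z ++ (p2 ++ 0 :: r)) : Int)) < 3
    · simp
      intro h
      simp [List.count_append] at hc3
      exact absurd h (by omega)
    · simp only [if_neg hc3]
      have hstep0 : ∀ t, hollowRunStep ((false, (p2.length : Int)) :: t) 0 =
          (true, 1) :: (false, (p2.length : Int)) :: t := by
        intro t; simp [hollowRunStep]
      by_cases hp0 : p = []
      · subst hp0
        obtain ⟨rr, m, hrr⟩ := bf_deep r true 1 [(false, (p2.length : Int)), (true, (z.length : Int))]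
        rw [show List.foldl hollowRunStep ([] : List (Bool × Int)) ([] ++ z ++ (p2 ++ 0 :: r))
            = rr ++ (true, m) :: [(false, (p2.length : Int)), (true, (z.length : Int))] by
          rw [List.nil_append, List.foldl_append, bf_zero_nil z hz hzne, List.foldl_append,
            bf_nonzero_push p2 hp2 hp2ne _ [], List.foldl_cons, hstep0, hrr]]
        rw [List.reverse_append, List.reverse_cons]
        rcases hrev : rr.reverse with _ | ⟨a, l⟩ <;> simp
      · obtain ⟨rr, m, hrr⟩ := bf_deep r true 1
          [(false, (p2.length : Int)), (true, (z.length : Int)), (false, (p.length : Int))]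
        rw [show List.foldl hollowRunStep ([] : List (Bool × Int)) (p ++ z ++ (p2 ++ 0 :: r))
            = rr ++ (true, m) :: [(false, (p2.length : Int)), (true, (z.length : Int)), (false, (p.length : Int))] by
          rw [List.foldl_append, List.foldl_append, List.foldl_append, bf_nonzero_nil p hp hp0,
            bf_zero_push z hz hzne _ [], bf_nonzero_push p2 hp2 hp2ne _ _,
            List.foldl_cons, hstep0, hrr]]
        rw [List.reverse_append, List.reverse_cons]
        rcases hrev : rr.reverse with _ | ⟨a, l⟩ <;> simp
  rw [hB]
  -- A side is false
  simp only [is_hollow]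
  rw [counter_get?_zero _ hx]
  by_cases hc3 : ((List.count 0 (p ++ z ++ (p2 ++ 0 :: r)) : Int)) < 3
  · simp
    intro h
    simp [List.count_append] at hc3
    exact absurd h (by omega)
  · simp only [if_neg hc3]
    -- the first/last-zero fold
    have hs1 : ∀ j : Int, (some ((p.length : Int) + z.length - 1) : Option Int) = some j →
        j < ((p.length : Int) + z.length + p2.length) := by
      rintro j hj
      have hpl : p2.length ≠ 0 := fun h => hp2ne (List.length_eq_zero_iff.mp h)
      cases hj; omega
    have hstepA0 : ∀ (f j i : Int), j < i → hollowStepA (some f, some j) (i, 0) = (some f, some i) := by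
      intro f j i h; simp [hollowStepA, h]
    rw [PySem.List.enumerate_append, PySem.List.enumerate_append, PySem.List.enumerate_append,
      List.foldl_append, List.foldl_append, List.foldl_append,
      af_nonzero p hp, af_zero z hz hzne _ none none (by simp), af_nonzero p2 hp2,
      PySem.List.enumerate_cons, List.foldl_cons, hstepA0 _ _ _ (by push_cast [List.length_append]; omega)]
    obtain ⟨m, hm, hle⟩ := af_grow r ((0:Int) + (((p ++ z).length : Int)) + (p2.length : Int) + 1)
      ((0:Int) + (((p ++ z).length : Int)) + (p2.length : Int))
      ((none : Option Int).getD (0 + (p.length : Int))) (by omega)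
    rw [hm]
    have hval : ∃ w ∈ p2, PySem.List.pyGetD (p ++ z ++ (p2 ++ 0 :: r)) (((p.length + z.length : Nat) : Int)) 0 = w := by
      rw [PySem.List.pyGetD_natCast, List.getD_eq_getElem?_getD]
      rw [List.getElem?_append_right (by simp)]
      rw [show p.length + z.length - (p ++ z).length = 0 by simp]
      rw [List.getElem?_append_left (by exact List.length_pos_of_ne_nil hp2ne)]
      rw [List.getElem?_eq_getElem (List.length_pos_of_ne_nil hp2ne)]
      exact ⟨_, List.getElem_mem _, rfl⟩
    obtain ⟨w, hwmem, hw⟩ := hval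
    have hpl2 : p2.length ≠ 0 := fun h => hp2ne (List.length_eq_zero_iff.mp h)
    simp
    intro hcontra
    exfalso
    have h0 := hcontra ((p.length + z.length : Nat) : Int) (by push_cast; omega)
      (by push_cast [List.length_append] at hle ⊢; omega)
    rw [← List.append_assoc, hw] at h0
    exact hp2 w hwmem h0

theorem main_eq (x : List Int) (hx : (0 : Int) ∈ x) : is_hollow x = is_hollow_alt x := by
  obtain ⟨p, z, s, hxeq, hp, hzne, hz, hcase⟩ := decomp x hx
  subst hxeq
  rcases hcase with hs | ⟨p2, r, hseq, hp2ne, hp2⟩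
  · exact shapeA_eq p z s hp hzne hz hs
  · subst hseq
    exact shapeB_eq p z p2 r hp hzne hz hp2ne hp2

-- ===== VERDICT (by name: the statement is the Claim_ definition above) =====
theorem is_hollow_spec : Claim_equal_is_hollow := by
  intro x _ hpre
  unfold Spec_is_hollow
  exact main_eq x hpre
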